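-- pv_equiv track=rewrite | github.com/rutlandjoe-crypto/global-entertainment-report-web | build_substack_post.py | clean_report
-- ===== SOURCE A (Python) =====
-- DISCLAIMER = (
--     "This report is an automated summary intended to support, not replace, "
--     "human sports journalism."
-- )
--
-- def clean_report(text: str) -> str:
--     lines = [line.rstrip() for line in text.splitlines()]
--     cleaned = []
--     seen_disclaimer = False
--     blank_streak = 0
--
--     for line in lines:
--         stripped = line.strip()
--
--         if stripped == DISCLAIMER:
--             if seen_disclaimer:
--                 continue
--             seen_disclaimer = True
--
--         if not stripped:
--             blank_streak += 1
--             if blank_streak <= 1 and cleaned: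
--                 cleaned.append("")
--             continue
--
--         blank_streak = 0
--         cleaned.append(stripped)
--
--     while cleaned and cleaned[-1] == "":
--         cleaned.pop()
--
--     return "\n".join(cleaned).strip()
-- ===== SOURCE B (Python) =====
-- from itertools import groupby
--
-- DISCLAIMER = (
--     "This report is an automated summary intended to support, not replace, "
--     "human sports journalism."
-- )
--
-- def clean_report(text: str) -> str:
--     # Stage 1: strip lines and drop every disclaimer line after the first.
--     deduped = []
--     seen = False
--     for raw in text.splitlines():
--         s = raw.strip()
--         if s == DISCLAIMER:
--             if seen:
--                 continue
--             seen = True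
--         deduped.append(s)
--     # Stage 2: collapse each run of blank lines to a single blank line.
--     parts = []
--     for blank, group in groupby(deduped, key=lambda s: s == ""):
--         if blank:
--             parts.append("")
--         else:
--             parts.extend(group)
--     # Stage 3: trim blank lines at both ends.
--     while parts and parts[0] == "":
--         parts.pop(0)
--     while parts and parts[-1] == "":
--         parts.pop()
--     return "\n".join(parts).strip()
-- ===== Notes on version B (the rewrite author's own statement) =====
-- stated objective: simpler
-- what changed: Replaces A's single stateful pass (blank_streak counter + seen flag + conditional appends) by a three-stage pipeline: dedupe disclaimer lines, collapse blank runs with itertools.groupby, then trim blanks at both ends.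
import Mathlib
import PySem

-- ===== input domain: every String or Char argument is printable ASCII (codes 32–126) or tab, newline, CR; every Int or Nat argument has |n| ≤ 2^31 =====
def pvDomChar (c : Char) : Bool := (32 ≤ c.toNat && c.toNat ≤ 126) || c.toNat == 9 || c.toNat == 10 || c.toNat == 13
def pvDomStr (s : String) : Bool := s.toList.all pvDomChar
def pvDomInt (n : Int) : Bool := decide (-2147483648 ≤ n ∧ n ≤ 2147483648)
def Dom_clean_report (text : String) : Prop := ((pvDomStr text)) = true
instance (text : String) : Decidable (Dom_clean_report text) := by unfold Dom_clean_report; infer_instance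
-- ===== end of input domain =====

-- B replaces A's single stateful pass (blank-streak counter + seen flag) by a
-- three-stage pipeline (dedupe disclaimer, groupby-collapse blank runs, trim ends).

-- ===== PORT A =====
/-- The module constant `DISCLAIMER`. -/
def pvDisclaimer : String :=
  "This report is an automated summary intended to support, not replace, human sports journalism."

/-- One iteration of A's `for line in lines` loop body, applied to `line.strip()`;
    state = (cleaned, seen_disclaimer, blank_streak). -/
def pvStepA (st : List String × Bool × Int) (stripped : String) : List String × Bool × Int :=
  if stripped = pvDisclaimer ∧ st.2.1 = true then st          -- `continue` on a repeated disclaimer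
  else
    let seen := st.2.1 || decide (stripped = pvDisclaimer)
    if stripped = "" then
      let streak := st.2.2 + 1
      if streak ≤ 1 ∧ st.1 ≠ [] then (st.1 ++ [""], seen, streak) else (st.1, seen, streak)
    else (st.1 ++ [stripped], seen, 0)

/-- A's `while cleaned and cleaned[-1] == "": cleaned.pop()` loop (drop the trailing
    run of empty strings), as the obvious structural recursion. -/
def pvPopTrailing : List String → List String
  | [] => []
  | x :: r =>
    match pvPopTrailing r with
    | [] => if x = "" then [] else [x]
    | r' => x :: r'

def clean_report (text : String) : String :=
  let lines := (PySem.Str.splitlines text).map (fun l => PySem.Str.rstrip l)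
  let st := lines.foldl (fun st line => pvStepA st (PySem.Str.strip line)) ([], false, 0)
  PySem.Str.strip (PySem.Str.join "\n" (pvPopTrailing st.1))

-- ===== PORT B =====
/-- B stage 1: the dedupe loop — keep every stripped line, dropping disclaimer
    lines after the first. -/
def pvDedup (seen : Bool) : List String → List String
  | [] => []
  | s :: r =>
    if s = pvDisclaimer then
      if seen then pvDedup true r else s :: pvDedup true r
    else s :: pvDedup seen r

/-- B stage 2: the `itertools.groupby` loop keyed on blankness — one `""` per blank
    group, non-blank groups copied whole; ported as recursion over maximal runs (exact). -/
def pvCollapse : List String → List String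
  | [] => []
  | s :: r =>
    if s = "" then "" :: pvCollapse (r.dropWhile (fun t => t == ""))
    else (s :: r.takeWhile (fun t => !(t == ""))) ++ pvCollapse (r.dropWhile (fun t => !(t == "")))
termination_by l => l.length
decreasing_by
  · exact Nat.lt_succ_of_le (List.length_dropWhile_le _ _)
  · exact Nat.lt_succ_of_le (List.length_dropWhile_le _ _)

def clean_report_alt (text : String) : String :=
  let deduped := pvDedup false ((PySem.Str.splitlines text).map (fun l => PySem.Str.strip l))
  let parts := pvCollapse deduped
  let parts := parts.dropWhile (fun t => t == "")   -- `while parts and parts[0] == "": parts.pop(0)`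
  let parts := pvPopTrailing parts                  -- `while parts and parts[-1] == "": parts.pop()`
  PySem.Str.strip (PySem.Str.join "\n" parts)

-- ===== PRECONDITION & SPEC =====
def Spec_clean_report (text : String) (out : String) : Prop := out = clean_report_alt text
instance (text : String) (out : String) : Decidable (Spec_clean_report text out) := by unfold Spec_clean_report; infer_instance

-- ===== CLAIM (what is proved, stated in full; the proofs are below) =====
def Claim_equal_clean_report : Prop := ∀ (text : String), Dom_clean_report text → Spec_clean_report text (clean_report text)

-- ===== LEMMAS AND PROOFS =====

-- `.strip()` after `.rstrip()` is plain `.strip()`: left/right stripping commute.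
theorem pv_lr_comm {α : Type} (p : α → Bool) (l : List α) :
    List.dropWhile p ((List.dropWhile p l.reverse).reverse)
      = (List.dropWhile p ((List.dropWhile p l).reverse)).reverse := by
  induction l with
  | nil => simp
  | cons x t ih =>
    by_cases hx : p x = true <;> by_cases ht : List.dropWhile p t.reverse = []
    · have h2 : List.dropWhile p t = [] := by
        rw [List.dropWhile_eq_nil_iff]
        intro a ha
        exact List.dropWhile_eq_nil_iff.mp ht a (by simpa using ha)
      simp [List.dropWhile_append, ht, h2, hx]
    · simp only [List.reverse_cons, List.dropWhile_append, List.isEmpty_iff, ht, if_false,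
        List.reverse_append, List.dropWhile_cons, hx]
      simpa using ih
    · simp [List.dropWhile_append, ht, hx]
    · simp [List.dropWhile_append, ht, hx]

theorem pv_strip_rstrip (s : String) :
    PySem.Str.strip (PySem.Str.rstrip s) = PySem.Str.strip s := by
  simp only [PySem.Str.strip, PySem.Str.rstrip, PySem.Chars.strip, PySem.Chars.rstrip,
    PySem.Chars.lstrip]
  simp only [String.toList_ofList]
  rw [pv_lr_comm]
  simp [List.dropWhile_idempotent]
  exact congrArg String.ofList (pv_lr_comm _ _)

-- A's loop body with the disclaimer logic removed; state = (cleaned, blank_streak).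
def pvStepB (st : List String × Int) (s : String) : List String × Int :=
  if s = "" then
    if st.2 + 1 ≤ 1 ∧ st.1 ≠ [] then (st.1 ++ [""], st.2 + 1) else (st.1, st.2 + 1)
  else (st.1 ++ [s], 0)

-- What the blank-collapsing loop appends once `cleaned` is non-empty;
-- b = "the streak counter is zero".
def pvMid : List String → Bool → List String
  | [], _ => []
  | s :: r, b => if s = "" then (if b then [""] else []) ++ pvMid r false else s :: pvMid r true

theorem pvD_ne : pvDisclaimer ≠ "" := by decide

theorem pv_stepA_disc_seen (c : List String) (k : Int) :
    pvStepA (c, true, k) pvDisclaimer = (c, true, k) := by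
  simp [pvStepA]

theorem pv_stepA_disc_new (c : List String) (k : Int) :
    pvStepA (c, false, k) pvDisclaimer = (c ++ [pvDisclaimer], true, 0) := by
  simp [pvStepA, pvD_ne]

theorem pv_stepA_other (c : List String) (seen : Bool) (k : Int) (s : String)
    (hs : s ≠ pvDisclaimer) :
    pvStepA (c, seen, k) s = ((pvStepB (c, k) s).1, seen, (pvStepB (c, k) s).2) := by
  by_cases hb : s = ""
  · subst hb
    simp only [pvStepA, pvStepB, hs]
    split_ifs <;> simp_all
  · simp [pvStepA, pvStepB, hs, hb]

theorem pv_dedup_commute (L : List String) (c : List String) (seen : Bool) (k : Int) :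
    (List.foldl pvStepA (c, seen, k) L).1 = (List.foldl pvStepB (c, k) (pvDedup seen L)).1 := by
  induction L generalizing c seen k with
  | nil => simp [pvDedup]
  | cons s r ih =>
    by_cases hd : s = pvDisclaimer
    · subst hd
      cases seen with
      | false =>
        rw [List.foldl_cons, pv_stepA_disc_new]
        have h1 : pvDedup false (pvDisclaimer :: r) = pvDisclaimer :: pvDedup true r := by
          simp [pvDedup]
        have h2 : pvStepB (c, k) pvDisclaimer = (c ++ [pvDisclaimer], 0) := by
          simp [pvStepB, pvD_ne]
        rw [h1, List.foldl_cons, h2]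
        exact ih (c ++ [pvDisclaimer]) true 0
      | true =>
        rw [List.foldl_cons, pv_stepA_disc_seen]
        have h1 : pvDedup true (pvDisclaimer :: r) = pvDedup true r := by simp [pvDedup]
        rw [h1]
        exact ih c true k
    · rw [List.foldl_cons, pv_stepA_other c seen k s hd]
      have h1 : pvDedup seen (s :: r) = s :: pvDedup seen r := by simp [pvDedup, hd]
      rw [h1, List.foldl_cons]
      have h2 : pvStepB (c, k) s = ((pvStepB (c, k) s).1, (pvStepB (c, k) s).2) := rfl
      rw [h2]
      exact ih (pvStepB (c, k) s).1 seen (pvStepB (c, k) s).2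

theorem pv_mid_spec (L : List String) (c : List String) (k : Int) (hk : 0 ≤ k) (hc : c ≠ []) :
    (List.foldl pvStepB (c, k) L).1 = c ++ pvMid L (decide (k = 0)) := by
  induction L generalizing c k with
  | nil => simp [pvMid]
  | cons s r ih =>
    rw [List.foldl_cons]
    by_cases hb : s = ""
    · subst hb
      by_cases hk0 : k = 0
      · subst hk0
        have hstep : pvStepB (c, 0) "" = (c ++ [""], 1) := by simp [pvStepB, hc]
        rw [hstep, ih (c ++ [""]) 1 (by omega) (by simp)]
        have d1 : (decide ((1 : Int) = 0)) = false := by decide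
        simp [pvMid]
      · have hcond : ¬(k + 1 ≤ 1 ∧ c ≠ []) := by
          intro h; exact hk0 (by omega)
        have hstep : pvStepB (c, k) "" = (c, k + 1) := by
          simp only [pvStepB, if_neg hcond]
          simp
        rw [hstep, ih c (k + 1) (by omega) hc]
        have d1 : (decide (k + 1 = 0)) = false := by simp; omega
        have d2 : (decide (k = 0)) = false := by simp [hk0]
        simp [pvMid, d1, d2]
    · have hstep : pvStepB (c, k) s = (c ++ [s], 0) := by simp [pvStepB, hb]
      rw [hstep, ih (c ++ [s]) 0 (by omega) (by simp)]
      simp [pvMid, hb]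

theorem pv_start_spec (L : List String) (k : Int) (hk : 0 ≤ k) :
    (List.foldl pvStepB (([] : List String), k) L).1
      = match L.dropWhile (fun t => t == "") with
        | [] => []
        | s :: r => s :: pvMid r true := by
  induction L generalizing k with
  | nil => simp
  | cons s r ih =>
    rw [List.foldl_cons]
    by_cases hb : s = ""
    · subst hb
      have hstep : pvStepB (([] : List String), k) "" = ([], k + 1) := by simp [pvStepB]
      rw [hstep, ih (k + 1) (by omega)]
      simp
    · have hbne : (s == "") = false := by simpa using hb
      have hstep : pvStepB (([] : List String), k) s = ([s], 0) := by simp [pvStepB, hb]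
      rw [hstep, pv_mid_spec r [s] 0 (by omega) (by simp)]
      simp [hbne]

theorem pv_mid_collapse (n : Nat) (L : List String) (h : L.length ≤ n) :
    (pvMid L true
        = L.takeWhile (fun t => !(t == "")) ++ pvCollapse (L.dropWhile (fun t => !(t == ""))))
    ∧ (pvMid L false = pvCollapse (L.dropWhile (fun t => t == ""))) := by
  induction n generalizing L with
  | zero =>
    have hL : L = [] := by cases L <;> simp_all
    subst hL
    simp [pvMid, pvCollapse]
  | succ n ih =>
    cases L with
    | nil => simp [pvMid, pvCollapse]
    | cons s r =>
      have hr : r.length ≤ n := by simpa using h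
      by_cases hb : s = ""
      · subst hb
        constructor
        · have h2 := (ih r hr).2
          simp [pvMid, pvCollapse, h2]
        · have h2 := (ih r hr).2
          simp [pvMid, h2]
      · have hbne : (s == "") = false := by simpa using hb
        constructor
        · have h1 := (ih r hr).1
          simp [pvMid, hb, hbne, h1]
        · have h1 := (ih r hr).1
          simp [pvMid, hb, hbne, pvCollapse, h1]

theorem pv_head_dropWhile (l : List String) (x : String) (xs : List String)
    (h : l.dropWhile (fun t => t == "") = x :: xs) : (x == "") = false := by
  induction l with
  | nil => simp at h
  | cons a t ih =>
    simp only [List.dropWhile_cons] at h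
    by_cases ha : (a == "") = true
    · rw [if_pos ha] at h
      exact ih h
    · rw [if_neg ha] at h
      cases h
      simpa using ha

theorem pv_collapse_dropWhile (L : List String) :
    (pvCollapse L).dropWhile (fun t => t == "") = pvCollapse (L.dropWhile (fun t => t == "")) := by
  cases L with
  | nil => simp [pvCollapse]
  | cons s r =>
    by_cases hb : s = ""
    · subst hb
      have h1 : pvCollapse ("" :: r) = "" :: pvCollapse (r.dropWhile (fun t => t == "")) := by
        simp [pvCollapse]
      have h3 : List.dropWhile (fun t => t == "") ("" :: r) = r.dropWhile (fun t => t == "") := by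
        simp
      rw [h1, h3]
      have h2 : List.dropWhile (fun t => t == "") ("" :: pvCollapse (r.dropWhile (fun t => t == "")))
          = List.dropWhile (fun t => t == "") (pvCollapse (r.dropWhile (fun t => t == ""))) := by
        simp
      rw [h2]
      cases hM : r.dropWhile (fun t => t == "") with
      | nil => simp [pvCollapse]
      | cons x xs =>
        have hx : (x == "") = false := pv_head_dropWhile _ _ _ hM
        have hx' : x ≠ "" := by simpa using hx
        have h4 : pvCollapse (x :: xs)
            = (x :: xs.takeWhile (fun t => !(t == ""))) ++ pvCollapse (xs.dropWhile (fun t => !(t == ""))) := by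
          simp [pvCollapse, hx']
        rw [h4]
        simp [hx]
    · have hbne : (s == "") = false := by simpa using hb
      have h4 : pvCollapse (s :: r)
          = (s :: r.takeWhile (fun t => !(t == ""))) ++ pvCollapse (r.dropWhile (fun t => !(t == ""))) := by
        simp [pvCollapse, hb]
      have h3 : List.dropWhile (fun t => t == "") (s :: r) = s :: r := by
        simp [hbne]
      rw [h3, h4]
      simp [hbne]

theorem pv_main (S : List String) :
    (List.foldl pvStepA (([], false, 0) : List String × Bool × Int) S).1
      = (pvCollapse (pvDedup false S)).dropWhile (fun t => t == "") := by
  rw [pv_dedup_commute S [] false 0, pv_start_spec (pvDedup false S) 0 (by omega)]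
  rw [pv_collapse_dropWhile]
  cases hM : (pvDedup false S).dropWhile (fun t => t == "") with
  | nil => simp [pvCollapse]
  | cons s r =>
    have hs : (s == "") = false := pv_head_dropWhile _ _ _ hM
    have hs' : s ≠ "" := by simpa using hs
    have hc : pvCollapse (s :: r)
        = (s :: r.takeWhile (fun t => !(t == ""))) ++ pvCollapse (r.dropWhile (fun t => !(t == ""))) := by
      simp [pvCollapse, hs']
    rw [hc]
    have h1 := (pv_mid_collapse r.length r (le_refl _)).1
    simp [h1]

-- ===== VERDICT (by name: the statement is the Claim_ definition above) =====
theorem clean_report_spec : Claim_equal_clean_report := by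
  intro text _
  unfold Spec_clean_report
  show clean_report text = clean_report_alt text
  simp only [clean_report, clean_report_alt, List.foldl_map]
  have hfun : (fun (st : List String × Bool × Int) l => pvStepA st (PySem.Str.strip (PySem.Str.rstrip l)))
      = fun st l => pvStepA st (PySem.Str.strip l) := by
    funext st l
    rw [pv_strip_rstrip]
  rw [hfun]
  have h := pv_main ((PySem.Str.splitlines text).map (fun l => PySem.Str.strip l))
  rw [List.foldl_map] at h
  rw [h]
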